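-- pv_equiv track=rewrite | github.com/VasilyStepanov/libcssom | cg/Emitter.py | splitCamelCase
-- ===== SOURCE A (Python) =====
-- def splitCamelCase(ident):
--   assert(' ' not in ident)
--
--   if not ident: return ident
--
--   words = []
--   word = []
--
--
--   pch = ''
--   for ch in ident:
--     if pch.isupper() and ch.islower():
--       if word: words.append(''.join(word))
--       word = [pch]
--     else:
--       if pch: word.append(pch)
--
--     pch = ch
--
--   word.append(ch)
--   words.append(''.join(word))
--
--   return words
-- ===== SOURCE B (Python) =====
-- def splitCamelCase(ident):
--   assert(' ' not in ident)
--
--   if not ident: return ident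
--
--   # compute split points first, then slice: a word break sits before each
--   # position j>0 where an uppercase char is followed by a lowercase one
--   bounds = [j for j, (c, d) in enumerate(zip(ident, ident[1:]))
--             if j > 0 and c.isupper() and d.islower()]
--   bounds = [0] + bounds + [len(ident)]
--   return [ident[a:b] for a, b in zip(bounds, bounds[1:])]
-- ===== Notes on version B (the rewrite author's own statement) =====
-- stated objective: simpler
-- what changed: Replaces A's lagged single-char accumulator loop (pch/word/words with a trailing append after the loop) by computing the word-break indices up front (a filtered enumerate over adjacent character pairs) and slicing the string between consecutive break points.
-- outside the precondition, e.g. on splitCamelCase(''): A returns '', B returns ''; on splitCamelCase(' '): A raises AssertionError, B raises AssertionError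
import Mathlib
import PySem

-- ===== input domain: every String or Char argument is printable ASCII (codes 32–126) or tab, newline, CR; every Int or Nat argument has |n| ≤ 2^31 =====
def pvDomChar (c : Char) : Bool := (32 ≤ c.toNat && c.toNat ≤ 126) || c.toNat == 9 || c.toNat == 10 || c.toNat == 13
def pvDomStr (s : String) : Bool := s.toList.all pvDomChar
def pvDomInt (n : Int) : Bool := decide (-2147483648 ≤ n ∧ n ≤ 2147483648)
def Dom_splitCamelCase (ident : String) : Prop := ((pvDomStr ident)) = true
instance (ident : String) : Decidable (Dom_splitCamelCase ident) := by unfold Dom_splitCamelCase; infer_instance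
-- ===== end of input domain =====

-- B computes the word-break indices first (a filtered enumerate of adjacent pairs) and slices,
-- instead of A's lagged char-accumulator loop; objective: simpler/alternative, return value only.

-- ===== PORT A =====
-- loop state: (words, word, pch); pch = none models Python's initial pch = '' (falsy, not upper)
def splitALoop : List Char → List String → List Char → Option Char → List String × List Char × Option Char
  | [], ws, w, p => (ws, w, p)
  | ch :: rest, ws, w, p =>
    match p with
    | some pc =>
      if PySem.Chars.isupper pc && PySem.Chars.islower ch then
        splitALoop rest (if w.isEmpty then ws else ws ++ [String.ofList w]) [pc] (some ch)
      else
        splitALoop rest ws (w ++ [pc]) (some ch)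
    | none => splitALoop rest ws w (some ch)

-- assert(' ' not in ident) raises on strings with a space (outside Pre_);
-- 'if not ident: return ident' returns the STRING '' (not a list) on "" (outside Pre_): ported as [].
def splitCamelCase (ident : String) : List String :=
  if ident = "" then [] else
  match splitALoop ident.toList [] [] none with
  | (ws, w, some c) => ws ++ [String.ofList (w ++ [c])]   -- word.append(ch); words.append(''.join(word))
  | (ws, _, none) => ws                                -- unreachable for nonempty ident

-- ===== PORT B =====
def splitCamelCase_alt (ident : String) : List String :=
  if ident = "" then [] else
  let cs := ident.toList
  let bounds : List Int :=
    ((PySem.List.enumerate (cs.zip cs.tail) 0).filter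
      (fun jp => decide ((0:Int) < jp.1) && (PySem.Chars.isupper jp.2.1 && PySem.Chars.islower jp.2.2))).map (·.1)
  let bounds : List Int := 0 :: bounds ++ [(cs.length : Int)]
  (bounds.zip bounds.tail).map (fun ab => String.ofList (PySem.List.slice cs (some ab.1) (some ab.2)))

-- ===== PRECONDITION & SPEC =====
-- Pre_ excludes strings containing ' ' (A's assert raises AssertionError) and the empty string,
-- on which A returns the string '' instead of a list (not a value of the declared list type).
def Pre_splitCamelCase (ident : String) : Prop := ident ≠ "" ∧ ' ' ∉ ident.toList
instance (ident : String) : Decidable (Pre_splitCamelCase ident) := by unfold Pre_splitCamelCase; infer_instance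
def pvWitness_splitCamelCase : String := "fooBarBaz"

def Spec_splitCamelCase (ident : String) (out : List String) : Prop := out = splitCamelCase_alt ident
instance (ident : String) (out : List String) : Decidable (Spec_splitCamelCase ident out) := by unfold Spec_splitCamelCase; infer_instance

-- ===== CLAIM (what is proved, stated in full; the proofs are below) =====
def Claim_equal_splitCamelCase : Prop := ∀ (ident : String), Dom_splitCamelCase ident → Pre_splitCamelCase ident → Spec_splitCamelCase ident (splitCamelCase ident)

-- ===== LEMMAS AND PROOFS =====

def bnd (c d : Char) : Bool := PySem.Chars.isupper c && PySem.Chars.islower d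

-- reference splitter: current word `acc`, remaining chars
def goSpec : List Char → List Char → List (List Char)
  | acc, [] => [acc]
  | acc, c :: rest =>
    match rest with
    | [] => [acc ++ [c]]
    | d :: _ =>
      if bnd c d && !acc.isEmpty then acc :: goSpec [c] rest
      else goSpec (acc ++ [c]) rest

-- boundary indices of the suffix whose head sits at absolute index i
def ibounds : Nat → List Char → List Nat
  | _, [] => []
  | i, c :: rest =>
    match rest with
    | [] => []
    | d :: _ =>
      if 0 < i && bnd c d then i :: ibounds (i+1) rest else ibounds (i+1) rest

-- slices of cs between consecutive cut points
def chunksOf (cs : List Char) : List Nat → List (List Char)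
  | [] => []
  | a :: rest =>
    match rest with
    | [] => []
    | b :: _ => (cs.drop a).take (b - a) :: chunksOf cs rest

def assembleA : List String × List Char × Option Char → List String
  | (ws, w, some c) => ws ++ [String.ofList (w ++ [c])]
  | (ws, _, none) => ws
lemma loopA_eq_goSpec (rest : List Char) : ∀ (ws : List String) (w : List Char) (p : Char),
    assembleA (splitALoop rest ws w (some p)) = ws ++ (goSpec w (p :: rest)).map String.ofList := by
  induction rest with
  | nil => intro ws w p; simp [splitALoop, assembleA, goSpec]
  | cons ch rest ih =>
    intro ws w p
    by_cases h : (PySem.Chars.isupper p && PySem.Chars.islower ch) = true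
    · by_cases hw : w.isEmpty
      · have hw' : w = [] := by simpa [List.isEmpty_iff] using hw
        simp [splitALoop, h, hw', ih, goSpec, bnd]
      · simp [splitALoop, h, hw, ih, goSpec, bnd]
    · simp [splitALoop, h, ih, goSpec, bnd]
lemma enum_filter_bounds (xs : List Char) : ∀ (i : Nat),
    (((PySem.List.enumerate (xs.zip xs.tail) (i:Int)).filter
      (fun jp => decide ((0:Int) < jp.1) && (PySem.Chars.isupper jp.2.1 && PySem.Chars.islower jp.2.2))).map (·.1))
    = (ibounds i xs).map (fun j => (j : Int)) := by
  induction xs with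
  | nil => intro i; simp [PySem.List.enumerate_nil, ibounds]
  | cons c rest ih =>
    intro i
    match rest with
    | [] => simp [PySem.List.enumerate_nil, ibounds]
    | d :: rest' =>
      have h1 : ((c :: d :: rest').zip (c :: d :: rest').tail)
          = (c, d) :: ((d :: rest').zip (d :: rest').tail) := by simp
      have h2 : ((i:Int) + 1) = ((i+1 : Nat) : Int) := by push_cast; ring
      rw [h1, PySem.List.enumerate_cons, h2, List.filter_cons]
      have h3 : (decide ((0:Int) < ((i:Nat):Int))) = decide (0 < i) := by simp
      by_cases hi : 0 < i
      · by_cases hb : (PySem.Chars.isupper c && PySem.Chars.islower d) = true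
        · simp only [h3, hi, hb, decide_true, Bool.true_and, if_true, List.map_cons, ih]
          have hib : ibounds i (c :: d :: rest') = i :: ibounds (i+1) (d :: rest') := by
            simp [ibounds, hi, bnd]
            simpa using hb
          rw [hib]; simp
        · have hb' : (PySem.Chars.isupper c && PySem.Chars.islower d) = false := by simpa using hb
          have hbnd : bnd c d = false := hb'
          have hib : ibounds i (c :: d :: rest') = ibounds (i+1) (d :: rest') := by
            rw [ibounds]; simp [hbnd]
          rw [hb', hib]
          simp only [Bool.and_false, Bool.false_eq_true, if_false]
          exact ih (i+1)
      · have hi0 : i = 0 := by omega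
        subst hi0
        have hib : ibounds 0 (c :: d :: rest') = ibounds 1 (d :: rest') := by
          simp [ibounds]
        simp only [Nat.cast_zero, lt_self_iff_false, decide_false, Bool.false_and, hib]
        have := ih 1
        simpa using this
lemma zip_slice_eq_chunksOf (cs : List Char) : ∀ (ps : List Nat),
    (((ps.map (fun j => (j:Int))).zip (ps.map (fun j => (j:Int))).tail).map
      (fun ab => String.ofList (PySem.List.slice cs (some ab.1) (some ab.2))))
    = (chunksOf cs ps).map String.ofList := by
  intro ps
  induction ps with
  | nil => simp [chunksOf]
  | cons a rest ih =>
    match rest with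
    | [] => simp [chunksOf]
    | b :: rest' =>
      simp only [chunksOf] at ih ⊢
      simp at ih ⊢
      rw [PySem.List.slice_natCast]
      rw [← ih]
      exact ⟨rfl, rfl⟩

lemma take_succ_concat (cs : List Char) (c : Char) (t : List Char) (b i : Nat)
    (hd : cs.drop i = c :: t) (hb : b ≤ i) :
    (cs.drop b).take (i - b) ++ [c] = (cs.drop b).take (i + 1 - b) := by
  have hdd : (cs.drop b).drop (i - b) = c :: t := by
    rw [List.drop_drop]
    have h0 : b + (i - b) = i := by omega
    rw [h0, hd]
  have hlt : i - b < (cs.drop b).length := by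
    have := congrArg List.length hdd
    simp [List.length_drop] at this ⊢
    omega
  have hget : (cs.drop b)[i - b] = c := by
    have h2 := List.drop_eq_getElem_cons (l := cs.drop b) (i := i - b) hlt
    rw [hdd] at h2
    exact (List.cons_eq_cons.mp h2.symm).1
  have h3 : i + 1 - b = (i - b) + 1 := by omega
  rw [h3, List.take_succ]
  simp [List.getElem?_eq_getElem hlt, hget]
lemma goSpec_eq_chunksOf (cs : List Char) : ∀ (s : List Char) (b i : Nat),
    cs.drop i = s → b ≤ i → (b < i ∨ (b = 0 ∧ i = 0)) →
    goSpec ((cs.drop b).take (i - b)) s = chunksOf cs (b :: ibounds i s ++ [cs.length]) := by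
  intro s
  induction s with
  | nil =>
    intro b i hd hb _
    have hlen : cs.length ≤ i := by
      have := congrArg List.length hd; simp at this; omega
    have h1 : (cs.drop b).take (i - b) = cs.drop b := by
      apply List.take_of_length_le; simp; omega
    have h2 : (cs.drop b).take (cs.length - b) = cs.drop b := by
      apply List.take_of_length_le; simp
    simp [goSpec, ibounds, chunksOf, h1, h2]
  | cons c s ih =>
    intro b i hd hb hbi
    have hdt : cs.drop (i+1) = s := by
      rw [← List.tail_drop, hd, List.tail_cons]
    have hin : i < cs.length := by
      have := congrArg List.length hd; simp at this; omega
    cases s with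
    | nil =>
      have hn : cs.length = i + 1 := by
        have := congrArg List.length hdt; simp at this; omega
      have ht := take_succ_concat cs c [] b i hd hb
      simp [goSpec, ibounds, chunksOf, hn, ht]
    | cons d s' =>
      have hacc1 : (cs.drop i).take 1 = [c] := by rw [hd]; rfl
      by_cases hbnd : bnd c d = true
      · by_cases hz : b < i
        · have hne : ((cs.drop b).take (i - b)).isEmpty = false := by
            simp [List.take_eq_nil_iff, List.drop_eq_nil_iff]
            omega
          rw [goSpec]
          simp only [hbnd, hne, Bool.not_false, Bool.and_true, if_true]
          have hib : ibounds i (c :: d :: s') = i :: ibounds (i+1) (d :: s') := by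
            have h01 : 0 < i := by omega
            simp [ibounds, h01, hbnd]
          rw [hib]
          have hrec := ih i (i+1) hdt (by omega) (by omega)
          have : (cs.drop i).take (i + 1 - i) = [c] := by
            have : i + 1 - i = 1 := by omega
            rw [this, hacc1]
          rw [this] at hrec
          simp only [List.cons_append]
          have hch : chunksOf cs (b :: i :: (ibounds (i+1) (d :: s') ++ [cs.length]))
              = (cs.drop b).take (i - b) :: chunksOf cs (i :: (ibounds (i+1) (d :: s') ++ [cs.length])) := rfl
          rw [hch]
          simp only [List.cons_append] at hrec
          rw [hrec]
        · have hb0 : b = 0 := by omega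
          have hi0 : i = 0 := by rcases hbi with h | h; omega; exact h.2
          subst hb0; subst hi0
          rw [goSpec]
          simp only [Nat.sub_zero, List.take_zero, List.isEmpty_nil, Bool.not_true, Bool.and_false,
            Bool.false_eq_true, if_false]
          have hib : ibounds 0 (c :: d :: s') = ibounds 1 (d :: s') := by simp [ibounds]
          rw [hib]
          have hrec := ih 0 1 hdt (by omega) (by omega)
          have h1 : (cs.drop 0).take 1 = [c] := by simpa using hacc1
          rw [h1] at hrec
          simpa using hrec
      · have hbnd' : bnd c d = false := by simpa using hbnd
        rw [goSpec]
        simp only [hbnd', Bool.false_and, Bool.false_eq_true, if_false]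
        have hib : ibounds i (c :: d :: s') = ibounds (i+1) (d :: s') := by
          simp [ibounds, hbnd']
        rw [hib]
        have hrec := ih b (i+1) hdt (by omega) (by omega)
        rw [← take_succ_concat cs c (d :: s') b i hd hb] at hrec
        exact hrec
lemma match_eq_assembleA (tpl : List String × List Char × Option Char) :
    (match tpl with
      | (ws, w, some c) => ws ++ [String.ofList (w ++ [c])]
      | (ws, _, none) => ws) = assembleA tpl := by
  obtain ⟨ws, w, p⟩ := tpl; cases p <;> rfl

lemma splitCamelCase_eq_alt : ∀ (ident : String), Pre_splitCamelCase ident → splitCamelCase ident = splitCamelCase_alt ident := by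
  intro ident hpre
  obtain ⟨hne, -⟩ := hpre
  unfold splitCamelCase splitCamelCase_alt
  rw [if_neg hne, if_neg hne]
  dsimp only
  have hcs : ident.toList ≠ [] := by
    intro h
    exact hne (by simpa using congrArg String.ofList h)
  -- A side
  rw [match_eq_assembleA]
  have hA : assembleA (splitALoop ident.toList [] [] none)
      = (goSpec [] ident.toList).map String.ofList := by
    cases h : ident.toList with
    | nil => exact absurd h hcs
    | cons c t =>
      have h1 : splitALoop (c :: t) [] [] none = splitALoop t [] [] (some c) := rfl
      rw [h1, loopA_eq_goSpec]
      simp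
  rw [hA]
  -- B side
  have he := enum_filter_bounds ident.toList 0
  rw [Nat.cast_zero] at he
  rw [he]
  have hz := zip_slice_eq_chunksOf ident.toList (0 :: ibounds 0 ident.toList ++ [ident.toList.length])
  rw [← goSpec_eq_chunksOf ident.toList ident.toList 0 0 rfl (by omega) (by omega)] at hz
  simpa using hz.symm

-- ===== VERDICT (by name: the statement is the Claim_ definition above) =====
theorem splitCamelCase_spec : Claim_equal_splitCamelCase := by
  intro ident _ hpre
  exact splitCamelCase_eq_alt ident hpre
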